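-- pv_equiv track=rewrite | github.com/nazishatta/WaterSort | main.py | top_color_and_count
-- ===== SOURCE A (Python) =====
-- def top_color_and_count(tube):
--     if not tube:
--         return None, 0
--     color = tube[-1]
--     count = 0
--     for i in range(len(tube) - 1, -1, -1):
--         if tube[i] == color:
--             count += 1
--         else:
--             break
--     return color, count
-- ===== SOURCE B (Python) =====
-- def top_color_and_count(tube):
--     color, count = None, 0
--     for x in tube:
--         if x == color:
--             count += 1
--         else:
--             color, count = x, 1
--     return color, count
-- ===== Notes on version B (the rewrite author's own statement) =====
-- stated objective: alternative
-- what changed: Replaces A's backward index loop with early break by a single forward fold over the whole tube keeping a (color, count) accumulator that resets on every color change; the final accumulator is the trailing run.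
import Mathlib
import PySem

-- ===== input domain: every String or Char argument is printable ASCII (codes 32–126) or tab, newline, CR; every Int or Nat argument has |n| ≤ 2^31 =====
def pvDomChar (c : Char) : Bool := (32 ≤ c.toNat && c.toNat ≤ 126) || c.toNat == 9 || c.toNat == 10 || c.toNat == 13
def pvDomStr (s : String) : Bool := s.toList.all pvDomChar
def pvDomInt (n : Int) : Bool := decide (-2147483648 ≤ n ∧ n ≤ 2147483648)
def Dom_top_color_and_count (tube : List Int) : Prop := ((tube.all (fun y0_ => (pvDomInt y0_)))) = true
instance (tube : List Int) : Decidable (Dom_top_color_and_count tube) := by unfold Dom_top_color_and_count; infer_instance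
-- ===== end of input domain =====

-- B replaces A's backwards index loop with early break by one forward fold over the whole
-- tube, keeping a (color, count) accumulator that resets on each color change.

-- ===== PORT A =====
-- the 'for i in range(len(tube)-1, -1, -1)' loop with break; fuel n means current index i = n-1
def pvALoop (tube : List Int) (color : Int) : Nat → Int → Int
  | 0, count => count
  | n + 1, count =>
    match PySem.List.pyGet? tube (n : Int) with
    | some v => if v == color then pvALoop tube color n (count + 1) else count
    | none => count  -- unreachable: n < tube.length at every call

def top_color_and_count (tube : List Int) : Option Int × Int :=
  if tube = [] then (none, 0)
  else
    match PySem.List.pyGet? tube (-1) with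
    | none => (none, 0)  -- unreachable: tube is nonempty
    | some color => (some color, pvALoop tube color tube.length 0)

-- ===== PORT B =====
-- forward fold: 'color, count = None, 0; for x in tube: …'; x == color is the Python
-- comparison of an int with the current color (never equal while color is still None)
def top_color_and_count_alt (tube : List Int) : Option Int × Int :=
  tube.foldl
    (fun (st : Option Int × Int) x =>
      if st.1 = some x then (st.1, st.2 + 1) else (some x, 1))
    (none, 0)

-- ===== PRECONDITION & SPEC =====
def Spec_top_color_and_count (tube : List Int) (out : Option Int × Int) : Prop := out = top_color_and_count_alt tube
instance (tube : List Int) (out : Option Int × Int) : Decidable (Spec_top_color_and_count tube out) := by unfold Spec_top_color_and_count; infer_instance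

-- ===== CLAIM (what is proved, stated in full; the proofs are below) =====
def Claim_equal_top_color_and_count : Prop := ∀ (tube : List Int), Dom_top_color_and_count tube → Spec_top_color_and_count tube (top_color_and_count tube)

-- ===== LEMMAS AND PROOFS =====
-- common characterisation: top color and length of the trailing run
def pvSpecFn (tube : List Int) : Option Int × Int :=
  match tube.reverse with
  | [] => (none, 0)
  | c :: rest => (some c, 1 + ((rest.takeWhile (· == c)).length : Int))

lemma pvALoop_take (tube : List Int) (color : Int) :
    ∀ (n : Nat), n ≤ tube.length → ∀ (count : Int),
      pvALoop tube color n count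
        = count + ((((tube.take n).reverse.takeWhile (· == color)).length : Int)) := by
  intro n
  induction n with
  | zero => intro _ count; simp [pvALoop]
  | succ n ih =>
    intro hn count
    have hlt : n < tube.length := by omega
    have hget : PySem.List.pyGet? tube (n : Int) = some tube[n] :=
      PySem.List.pyGet?_ofNat tube n hlt
    have htake : (tube.take (n + 1)).reverse = tube[n] :: (tube.take n).reverse := by
      rw [List.take_add_one]
      simp [List.getElem?_eq_getElem hlt]
    rw [pvALoop, hget]
    by_cases hv : tube[n] = color
    · simp only [hv, beq_self_eq_true, if_true]
      rw [ih (by omega) (count + 1), htake, hv]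
      simp [List.takeWhile]
      ring
    · have hb : (tube[n] == color) = false := by simp [hv]
      simp only [hb, Bool.false_eq_true, if_false, htake]
      simp [List.takeWhile, hb]

lemma portA_eq_spec (tube : List Int) : top_color_and_count tube = pvSpecFn tube := by
  unfold top_color_and_count pvSpecFn
  rcases htr : tube.reverse with _ | ⟨c, rest⟩
  · have : tube = [] := by simpa using congrArg List.reverse htr
    simp [this]
  · have hne : tube ≠ [] := by intro h; rw [h] at htr; simp at htr
    have hlast : PySem.List.pyGet? tube (-1) = some c := by
      rw [PySem.List.pyGet?_neg_one, List.getLast?_eq_head?_reverse, htr]; rfl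
    simp only [if_neg hne, hlast]
    have := pvALoop_take tube c tube.length le_rfl 0
    rw [List.take_length] at this
    rw [this, htr]
    simp [List.takeWhile]
    ring

lemma portB_eq_spec (tube : List Int) : top_color_and_count_alt tube = pvSpecFn tube := by
  unfold top_color_and_count_alt
  induction tube using List.reverseRecOn with
  | nil => simp [pvSpecFn]
  | append_singleton l x ih =>
    rw [List.foldl_append, List.foldl_cons, List.foldl_nil, ih]
    unfold pvSpecFn
    rcases hlr : l.reverse with _ | ⟨c, rest⟩
    · have hl : l = [] := by simpa using congrArg List.reverse hlr
      subst hl; simp [List.takeWhile]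
    · rw [List.reverse_append]
      simp only [List.reverse_singleton, List.singleton_append, hlr]
      by_cases hc : c = x
      · subst hc
        simp [List.takeWhile]
        ring
      · have hb : (c == x) = false := by simp [hc]
        have : (some c = some x) = False := by simp [hc]
        simp [this, List.takeWhile, hb]

-- ===== VERDICT (by name: the statement is the Claim_ definition above) =====
theorem top_color_and_count_spec : Claim_equal_top_color_and_count := by
  intro tube _
  unfold Spec_top_color_and_count
  rw [portA_eq_spec, portB_eq_spec]
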